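-- pv_equiv track=rewrite | github.com/xupingmao/xnote | xutils/text_parser_properties.py | parse_prop_text_to_dict
-- ===== SOURCE A (Python) =====
-- def parse_prop_text_to_pairs(text: str) -> list:
--     """解析key/value格式的配置文本
--     @param {string} text 配置文本内容
--     @param {string} ret_type 返回的格式，包含list, dict
--     """
--     config = []
--
--     if text == None or text == "":
--         return config
--
--     for line in text.split("\n"):
--         line = line.strip()
--         if line == "":
--             continue
--
--         if line.startswith("#"):
--             continue
--
--         key = None
--         value = None
--
--         # 参考Java的Properties文件处理
--         # 分隔符 `:` 和 `=`
--         # 转义符 \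
--         # 转义内容 `\t` `\n` `\r` `\f` `\u1111`
--         for i, c in enumerate(line):
--             if c == ":" or c == "=":
--                 key = line[:i]
--                 value = line[i+1:]
--                 value = value.split("#", 1)[0]
--                 break
--
--         if key is None or value is None:
--             continue
--
--         key = key.strip()
--         value = value.strip()
--
--         config.append(dict(key=key, value=value))
--
--     return config
--
-- def parse_prop_text_to_dict(text):
--     pairs = parse_prop_text_to_pairs(text)
--     result = dict()
--     for item in pairs:
--         key = item.get("key")
--         value = item.get("value")
--         result[key] = value
--     return result
-- ===== SOURCE B (Python) =====
-- def parse_prop_text_to_dict(text):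
--     # Single character-level state machine over the whole text:
--     # no per-line split/strip/scan; one pass over text + sentinel newline.
--     result = {}
--     if text is None:
--         return result
--     state = 0  # 0: start of line (skip leading whitespace), 1: reading key,
--                # 2: reading value, 3: skipping rest of line (comment)
--     key = ""
--     buf = ""
--     for c in text + "\n":
--         if c == "\n":
--             if state == 2:
--                 result[key.strip()] = buf.strip()
--             state, key, buf = 0, "", ""
--         elif state == 0:
--             if c.isspace():
--                 pass
--             elif c == "#":
--                 state = 3
--             elif c == ":" or c == "=":
--                 state = 2
--             else:
--                 state, buf = 1, c
--         elif state == 1: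
--             if c == ":" or c == "=":
--                 state, key, buf = 2, buf, ""
--             else:
--                 buf += c
--         elif state == 2:
--             if c == "#":
--                 result[key.strip()] = buf.strip()
--                 state = 3
--             else:
--                 buf += c
--     return result
-- ===== Notes on version B (the rewrite author's own statement) =====
-- stated objective: alternative
-- what changed: B replaces A's line-splitting pipeline (split on newline, per-line strip, per-character delimiter scan, intermediate list of dicts, second dict-building loop) by a single character-level state machine scanning the text plus a sentinel newline once, with four states (line start, key, value, comment) and two buffers, assigning into the dict as soon as a line ends.
import Mathlib
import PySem

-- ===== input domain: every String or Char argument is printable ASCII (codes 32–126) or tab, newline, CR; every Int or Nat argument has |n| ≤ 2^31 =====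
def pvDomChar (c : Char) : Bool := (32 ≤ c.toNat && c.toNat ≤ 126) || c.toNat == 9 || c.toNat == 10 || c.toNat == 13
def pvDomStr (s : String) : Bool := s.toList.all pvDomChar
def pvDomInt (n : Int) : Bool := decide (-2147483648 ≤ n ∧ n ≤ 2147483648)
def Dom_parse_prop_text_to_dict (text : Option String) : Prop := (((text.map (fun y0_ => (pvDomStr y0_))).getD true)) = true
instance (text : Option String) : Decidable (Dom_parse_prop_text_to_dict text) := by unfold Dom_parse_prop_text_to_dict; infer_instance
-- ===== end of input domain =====

-- B replaces A's line-splitting pipeline (split, per-line strip, char scan, list of dicts,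
-- second loop) by a single four-state character-level state machine scanning the text plus a
-- sentinel newline once (objective: alternative).

-- ===== PORT A =====
-- inner `for i, c in enumerate(line): if c == ":" or c == "=": … break` loop
def aScan : List Char → Nat → Option Nat
  | [], _ => none
  | c :: rest, i => if c = ':' ∨ c = '=' then some i else aScan rest (i + 1)

-- body of A's per-line processing in parse_prop_text_to_pairs (none = `continue`);
-- the one-line python dict {key:…, value:…} is represented as the pair (key, value)
def aParseLine (rawline : String) : Option (String × String) :=
  let line := PySem.Str.strip rawline
  if line = "" then none
  else if PySem.Str.startswith line "#" then none
  else
    match aScan line.toList 0 with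
    | none => none
    | some i =>
      let key := PySem.Str.slice line none (some (i : Int))
      let value0 := PySem.Str.slice line (some ((i : Int) + 1)) none
      let value := ((PySem.Str.splitMax? value0 "#" 1).getD []).headD ""
      some (PySem.Str.strip key, PySem.Str.strip value)

def parse_prop_text_to_pairs (text : Option String) : List (String × String) :=
  match text with
  | none => []
  | some s =>
    if s = "" then []
    else ((PySem.Str.split? s "\n").getD []).filterMap aParseLine

def parse_prop_text_to_dict (text : Option String) : List (String × String) :=
  ((parse_prop_text_to_pairs text).foldl
    (fun d kv => PySem.Dict.insert d kv.1 kv.2) PySem.Dict.empty).items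

-- ===== PORT B =====
-- B's state machine step (`for c in text + "\n"` body); the Python string buffers `key`
-- and `buf` are ported as their character lists (PySem strings are lists of chars; exact).
def bStep (st : Nat × List Char × List Char × PySem.Dict String String) (c : Char) :
    Nat × List Char × List Char × PySem.Dict String String :=
  match st with
  | (state, key, buf, result) =>
    if c = '\n' then
      (0, [], [],
        if state = 2 then
          PySem.Dict.insert result (String.ofList (PySem.Chars.strip key))
            (String.ofList (PySem.Chars.strip buf))
        else result)
    else if state = 0 then
      if PySem.Chars.isspace c then (state, key, buf, result)
      else if c = '#' then (3, key, buf, result)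
      else if c = ':' ∨ c = '=' then (2, key, buf, result)
      else (1, key, [c], result)
    else if state = 1 then
      if c = ':' ∨ c = '=' then (2, buf, [], result)
      else (1, key, buf ++ [c], result)
    else if state = 2 then
      if c = '#' then
        (3, key, buf,
          PySem.Dict.insert result (String.ofList (PySem.Chars.strip key))
            (String.ofList (PySem.Chars.strip buf)))
      else (2, key, buf ++ [c], result)
    else (state, key, buf, result)

def parse_prop_text_to_dict_alt (text : Option String) : List (String × String) :=
  match text with
  | none => []
  | some s =>
    (((s.toList ++ "\n".toList).foldl bStep (0, [], [], PySem.Dict.empty)).2.2.2).items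

-- ===== PRECONDITION & SPEC =====
def Spec_parse_prop_text_to_dict (text : Option String) (out : List (String × String)) : Prop := out = parse_prop_text_to_dict_alt text
instance (text : Option String) (out : List (String × String)) : Decidable (Spec_parse_prop_text_to_dict text out) := by unfold Spec_parse_prop_text_to_dict; infer_instance

-- ===== CLAIM (what is proved, stated in full; the proofs are below) =====
def Claim_equal_parse_prop_text_to_dict : Prop := ∀ (text : Option String), Dom_parse_prop_text_to_dict text → Spec_parse_prop_text_to_dict text (parse_prop_text_to_dict text)

-- ===== LEMMAS AND PROOFS =====

-- split of a char list at a separator char, in the shape the proofs recurse on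
def mySplit (c : Char) : List Char → List (List Char)
  | [] => [[]]
  | x :: rest =>
    if x = c then [] :: mySplit c rest
    else
      match mySplit c rest with
      | h :: r => (x :: h) :: r
      | [] => [[x]]

theorem mySplit_ne_nil (c : Char) (t : List Char) : mySplit c t ≠ [] := by
  cases t with
  | nil => simp [mySplit]
  | cons x rest =>
    simp only [mySplit]
    split_ifs
    · simp
    · cases h : mySplit c rest <;> simp

theorem splitOn_go_eq_mySplit (c : Char) (fuel : Nat) :
    ∀ (t cur : List Char) (acc : List (List Char)), t.length < fuel →
    PySem.Chars.splitOn.go [c] fuel t cur acc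
      = acc.reverse ++ (cur.reverse ++ (mySplit c t).headI) :: (mySplit c t).tail := by
  induction fuel with
  | zero => intro t cur acc h; omega
  | succ fuel ih =>
    intro t cur acc h
    cases t with
    | nil => simp [PySem.Chars.splitOn.go, mySplit]
    | cons x rest =>
      by_cases hx : x = c
      · subst hx
        have hpre : ([x].isPrefixOf (x :: rest)) = true := by simp [List.isPrefixOf]
        have hrec := ih rest [] (cur.reverse :: acc) (by simp at h ⊢; omega)
        cases hms : mySplit x rest with
        | nil => exact absurd hms (mySplit_ne_nil x rest)
        | cons h' t' =>
          rw [hms] at hrec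
          simp [PySem.Chars.splitOn.go, hpre, hrec, mySplit, hms]
      · have hcc : (c == x) = false := beq_eq_false_iff_ne.mpr (fun q => hx q.symm)
        have hpre : ([c].isPrefixOf (x :: rest)) = false := by simp [List.isPrefixOf, hcc]
        have hrec := ih rest (x :: cur) acc (by simp at h ⊢; omega)
        cases hms : mySplit c rest with
        | nil => exact absurd hms (mySplit_ne_nil c rest)
        | cons h' t' =>
          rw [hms] at hrec
          simp [PySem.Chars.splitOn.go, hpre, hrec, mySplit, hx, hms]

theorem splitOn_eq_mySplit (c : Char) (t : List Char) :
    PySem.Chars.splitOn t [c] = mySplit c t := by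
  have h := splitOn_go_eq_mySplit c (t.length + 1) t [] [] (by omega)
  cases hms : mySplit c t with
  | nil => exact absurd hms (mySplit_ne_nil c t)
  | cons h' t' =>
    rw [hms] at h
    simpa [PySem.Chars.splitOn, hms] using h

theorem mySplit_no_sep (c : Char) (t : List Char) : ∀ u ∈ mySplit c t, c ∉ u := by
  induction t with
  | nil => intro u hu; simp [mySplit] at hu; simp [hu]
  | cons x rest ih =>
    intro u hu
    by_cases hx : x = c
    · subst hx
      simp [mySplit] at hu
      rcases hu with rfl | hu
      · simp
      · exact ih u hu
    · cases hms : mySplit c rest with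
      | nil => exact absurd hms (mySplit_ne_nil c rest)
      | cons h' t' =>
        simp [mySplit, hx, hms] at hu
        rcases hu with rfl | hu
        · have hh' : c ∉ h' := ih h' (by simp [hms])
          simp [hh']
          intro hc; exact hx hc.symm
        · exact ih u (by simp [hms, hu])

theorem mySplit_flatten (c : Char) (t : List Char) :
    t ++ [c] = ((mySplit c t).map (fun u => u ++ [c])).flatten := by
  induction t with
  | nil => simp [mySplit]
  | cons x rest ih =>
    by_cases hx : x = c
    · subst hx; simp [mySplit, ih]
    · cases hms : mySplit c rest with
      | nil => exact absurd hms (mySplit_ne_nil c rest)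
      | cons h' t' =>
        rw [hms] at ih
        simp [mySplit, hx, hms]
        simpa using ih

-- abbreviations used throughout the proofs
def WS (l : List Char) : Prop := ∀ a ∈ l, PySem.Chars.isspace a = true
def ND (l : List Char) : Prop := ∀ a ∈ l, ¬(a = ':' ∨ a = '=')
def noHash (a : Char) : Bool := a != '#'

-- machine-phase lemmas
theorem fold_state0_ws (k b : List Char) (d : PySem.Dict String String) (w : List Char)
    (hws : WS w) (hnl : '\n' ∉ w) :
    w.foldl bStep (0, k, b, d) = (0, k, b, d) := by
  induction w with
  | nil => rfl
  | cons a w ih =>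
    have ha : PySem.Chars.isspace a = true := hws a (by simp)
    have hne : ¬(a = '\n') := fun h => hnl (by simp [h])
    rw [List.foldl_cons, show bStep (0, k, b, d) a = (0, k, b, d) by simp [bStep, hne, ha]]
    exact ih (fun x hx => hws x (by simp [hx])) (fun h => hnl (by simp [h]))

theorem fold_state3 (k b : List Char) (d : PySem.Dict String String) (xs : List Char)
    (hnl : '\n' ∉ xs) :
    xs.foldl bStep (3, k, b, d) = (3, k, b, d) := by
  induction xs with
  | nil => rfl
  | cons a xs ih =>
    have hne : ¬(a = '\n') := fun h => hnl (by simp [h])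
    rw [List.foldl_cons, show bStep (3, k, b, d) a = (3, k, b, d) by simp [bStep, hne]]
    exact ih (fun h => hnl (by simp [h]))

theorem fold_state1 (k b : List Char) (d : PySem.Dict String String) (xs : List Char)
    (hnd : ND xs) (hnl : '\n' ∉ xs) :
    xs.foldl bStep (1, k, b, d) = (1, k, b ++ xs, d) := by
  induction xs generalizing b with
  | nil => simp
  | cons a xs ih =>
    have hne : ¬(a = '\n') := fun h => hnl (by simp [h])
    have had : ¬(a = ':' ∨ a = '=') := hnd a (by simp)
    rw [List.foldl_cons, show bStep (1, k, b, d) a = (1, k, b ++ [a], d) by simp [bStep, hne, had]]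
    rw [ih (b ++ [a]) (fun x hx => hnd x (by simp [hx])) (fun h => hnl (by simp [h]))]
    simp

theorem fold_state2 (k b : List Char) (d : PySem.Dict String String) (q : List Char)
    (hnl : '\n' ∉ q) :
    (q ++ ['\n']).foldl bStep (2, k, b, d)
      = (0, [], [], PySem.Dict.insert d (String.ofList (PySem.Chars.strip k))
          (String.ofList (PySem.Chars.strip (b ++ q.takeWhile noHash)))) := by
  induction q generalizing b with
  | nil => simp [bStep]
  | cons a q ih =>
    have hne : ¬(a = '\n') := fun h => hnl (by simp [h])
    have hnl' : '\n' ∉ q := fun h => hnl (by simp [h])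
    by_cases hash : a = '#'
    · subst hash
      rw [List.cons_append, List.foldl_cons,
        show bStep (2, k, b, d) '#'
          = (3, k, b, PySem.Dict.insert d (String.ofList (PySem.Chars.strip k))
              (String.ofList (PySem.Chars.strip b))) by simp [bStep],
        List.foldl_append, fold_state3 _ _ _ _ hnl']
      simp [bStep, noHash]
    · have hnh : noHash a = true := by simp [noHash, hash]
      rw [List.cons_append, List.foldl_cons,
        show bStep (2, k, b, d) a = (2, k, b ++ [a], d) by simp [bStep, hne, hash],
        ih (b ++ [a]) hnl']
      simp [hnh]

-- whitespace / strip facts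
theorem rstrip_append_nonspace_aux (x : List Char) (a : Char) (y : List Char)
    (h : PySem.Chars.isspace a = false) :
    PySem.Chars.rstrip (x ++ a :: y) = x ++ a :: PySem.Chars.rstrip y := by
  simp only [PySem.Chars.rstrip, List.reverse_append, List.reverse_cons, List.append_assoc,
    List.dropWhile_append]
  by_cases hy : (y.reverse.dropWhile PySem.Chars.isspace).isEmpty
  · rw [if_pos hy]
    have hy' : y.reverse.dropWhile PySem.Chars.isspace = [] := by simpa [List.isEmpty_iff] using hy
    simp [h, hy']
  · rw [if_neg hy]
    simp

theorem rstrip_cons_of_nonspace (a : Char) (l : List Char) (h : PySem.Chars.isspace a = false) :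
    PySem.Chars.rstrip (a :: l) = a :: PySem.Chars.rstrip l := by
  simpa using rstrip_append_nonspace_aux [] a l h

theorem rstrip_append_nonspace (x : List Char) (a : Char) (y : List Char)
    (h : PySem.Chars.isspace a = false) :
    PySem.Chars.rstrip (x ++ a :: y) = x ++ a :: PySem.Chars.rstrip y :=
  rstrip_append_nonspace_aux x a y h

theorem rstrip_decomp (l : List Char) :
    ∃ w, l = PySem.Chars.rstrip l ++ w ∧ WS w := by
  refine ⟨(l.reverse.takeWhile PySem.Chars.isspace).reverse, ?_, ?_⟩
  · simp only [PySem.Chars.rstrip]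
    rw [← List.reverse_append, List.takeWhile_append_dropWhile, List.reverse_reverse]
  · intro a ha
    exact List.mem_takeWhile_imp (by simpa using ha)

theorem rstrip_append_ws (x w : List Char) (h : WS w) :
    PySem.Chars.rstrip (x ++ w) = PySem.Chars.rstrip x := by
  have hw : w.reverse.dropWhile PySem.Chars.isspace = [] :=
    List.dropWhile_eq_nil_iff.mpr (fun a ha => h a (by simpa using ha))
  simp [PySem.Chars.rstrip, List.dropWhile_append, hw]

theorem strip_append_ws (x w : List Char) (h : WS w) :
    PySem.Chars.strip (x ++ w) = PySem.Chars.strip x := by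
  simp only [PySem.Chars.strip, PySem.Chars.lstrip, List.dropWhile_append]
  by_cases hx : (x.dropWhile PySem.Chars.isspace).isEmpty
  · rw [if_pos hx]
    have hx' : x.dropWhile PySem.Chars.isspace = [] := by simpa [List.isEmpty_iff] using hx
    have hw : w.dropWhile PySem.Chars.isspace = [] :=
      List.dropWhile_eq_nil_iff.mpr (fun a ha => h a ha)
    simp [hx', hw]
  · rw [if_neg hx]
    exact rstrip_append_ws _ _ h

theorem takeWhile_first_stop (p : Char → Bool) (x1 : List Char) (bch : Char) (y : List Char)
    (h1 : ∀ a ∈ x1, p a = true) (h2 : p bch = false) :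
    (x1 ++ bch :: y).takeWhile p = x1 := by
  induction x1 with
  | nil => simp [h2]
  | cons a x1 ih =>
    have ha : p a = true := h1 a (by simp)
    simp [ha, ih (fun x hx => h1 x (by simp [hx]))]

theorem head_dropWhile_false (p : Char → Bool) (l : List Char) (c : Char) (r : List Char)
    (h : l.dropWhile p = c :: r) : p c = false := by
  induction l with
  | nil => simp at h
  | cons a l ih =>
    rw [List.dropWhile_cons] at h
    split at h
    · exact ih h
    · next hp => cases h; simpa using hp

theorem strip_takeWhile_append_ws (x w : List Char) (h : WS w) :
    PySem.Chars.strip ((x ++ w).takeWhile noHash) = PySem.Chars.strip (x.takeWhile noHash) := by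
  by_cases hall : ∀ a ∈ x, noHash a = true
  · rw [List.takeWhile_append_of_pos hall]
    conv_rhs => rw [List.takeWhile_eq_self_iff.mpr (by simpa using hall)]
    exact strip_append_ws x _ (fun a ha => h a ((List.takeWhile_sublist _).subset ha))
  · have hne : x.dropWhile noHash ≠ [] := by
      intro hc
      exact hall (List.dropWhile_eq_nil_iff.mp hc)
    obtain ⟨bch, y, hdw⟩ := List.exists_cons_of_ne_nil hne
    have hb : noHash bch = false := head_dropWhile_false _ _ _ _ hdw
    have hx : x = x.takeWhile noHash ++ bch :: y := by
      conv_lhs => rw [← List.takeWhile_append_dropWhile (p := noHash) (l := x), hdw]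
    have h1 : ∀ a ∈ x.takeWhile noHash, noHash a = true := fun a ha => List.mem_takeWhile_imp ha
    have e1 : (x ++ w).takeWhile noHash = x.takeWhile noHash := by
      conv_lhs => rw [hx, List.append_assoc, List.cons_append]
      exact takeWhile_first_stop _ _ _ _ h1 hb
    rw [e1]

-- aScan characterisation
theorem aScan_none_aux (t : List Char) (h : ND t) : ∀ i, aScan t i = none := by
  induction t with
  | nil => intro i; rfl
  | cons a t ih =>
    intro i
    have ha : ¬(a = ':' ∨ a = '=') := h a (by simp)
    simp only [aScan, if_neg ha]
    exact ih (fun x hx => h x (by simp [hx])) (i + 1)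

theorem aScan_none (t : List Char) (h : ND t) : aScan t 0 = none :=
  aScan_none_aux t h 0

theorem aScan_first_aux (dc : Char) (q : List Char) (hd : dc = ':' ∨ dc = '=') :
    ∀ (p : List Char), ND p → ∀ i, aScan (p ++ dc :: q) i = some (i + p.length) := by
  intro p
  induction p with
  | nil => intro _ i; simp [aScan, hd]
  | cons a p ih =>
    intro hp i
    have ha : ¬(a = ':' ∨ a = '=') := hp a (by simp)
    simp only [List.cons_append, aScan, if_neg ha]
    rw [ih (fun x hx => hp x (by simp [hx])) (i + 1)]
    simp; omega

theorem aScan_first (p : List Char) (dc : Char) (q : List Char)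
    (hp : ND p) (hd : dc = ':' ∨ dc = '=') :
    aScan (p ++ dc :: q) 0 = some p.length := by
  simpa using aScan_first_aux dc q hd p hp 0

-- A's `value.split("#", 1)[0]` is takeWhile noHash (uses the splitOnMax loop shape)
theorem splitOnMax_go_acc (sep : List Char) (fuel : Nat) :
    ∀ (m : Nat) (t cur : List Char) (acc : List (List Char)),
    ∃ rest, rest ≠ [] ∧ PySem.Chars.splitOnMax.go sep fuel m t cur acc = acc.reverse ++ rest := by
  induction fuel with
  | zero =>
    intro m t cur acc
    exact ⟨[cur.reverse ++ t], by simp, by simp [PySem.Chars.splitOnMax.go]⟩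
  | succ fuel ih =>
    intro m t cur acc
    cases t with
    | nil => exact ⟨[cur.reverse], by simp, by simp [PySem.Chars.splitOnMax.go]⟩
    | cons c rest =>
      by_cases hm : m = 0
      · exact ⟨[cur.reverse ++ (c :: rest)], by simp, by simp [PySem.Chars.splitOnMax.go, hm]⟩
      · by_cases h : sep.isPrefixOf (c :: rest) = true
        · obtain ⟨r, hr, he⟩ := ih (m - 1) (List.drop sep.length (c :: rest)) [] (cur.reverse :: acc)
          exact ⟨cur.reverse :: r, by simp, by simp [PySem.Chars.splitOnMax.go, hm, h, he]⟩
        · obtain ⟨r, hr, he⟩ := ih m rest (c :: cur) acc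
          exact ⟨r, hr, by simp [PySem.Chars.splitOnMax.go, hm, h, he]⟩

theorem splitOnMax_go_head (c : Char) (fuel : Nat) :
    ∀ (m : Nat) (t cur : List Char) (acc : List (List Char)), t.length < fuel → m ≠ 0 →
    ∃ rest, PySem.Chars.splitOnMax.go [c] fuel m t cur acc
      = acc.reverse ++ (cur.reverse ++ t.takeWhile (fun x => x != c)) :: rest := by
  induction fuel with
  | zero => intro m t cur acc h hm; omega
  | succ fuel ih =>
    intro m t cur acc h hm
    cases t with
    | nil => exact ⟨[], by simp [PySem.Chars.splitOnMax.go]⟩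
    | cons c' rest =>
      by_cases hp : c = c'
      · subst hp
        obtain ⟨r, hr, he⟩ := splitOnMax_go_acc [c] fuel (m - 1) (List.drop 1 (c :: rest)) [] (cur.reverse :: acc)
        refine ⟨r, ?_⟩
        have hpre : ([c].isPrefixOf (c :: rest)) = true := by simp [List.isPrefixOf]
        rw [show List.drop 1 (c :: rest) = rest from rfl] at he
        simp [PySem.Chars.splitOnMax.go, hm, hpre, he]
      · have hcc : (c == c') = false := beq_eq_false_iff_ne.mpr hp
        have hcc' : (c' == c) = false := beq_eq_false_iff_ne.mpr (fun q => hp q.symm)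
        have hpre : ([c].isPrefixOf (c' :: rest)) = false := by
          simp [List.isPrefixOf, hcc]
        have hb : (c' != c) = true := by simp [bne, hcc']
        obtain ⟨r, he⟩ := ih m rest (c' :: cur) acc (by simp at h ⊢; omega) hm
        refine ⟨r, ?_⟩
        simp [PySem.Chars.splitOnMax.go, hm, hpre, he, hb]

theorem str_splitMax_head (s : String) :
    ((PySem.Str.splitMax? s "#" 1).getD []).headD ""
      = String.ofList (s.toList.takeWhile noHash) := by
  obtain ⟨r, he⟩ := splitOnMax_go_head '#' (s.toList.length + 1) 1 s.toList [] [] (by omega) (by omega)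
  have h1 : ¬ ((1 : Int) < 0) := by omega
  simp only [PySem.Str.splitMax?, PySem.Chars.splitMax?,
    show ("#" : String).toList = ['#'] from rfl, List.isEmpty_cons,
    Bool.false_eq_true, if_false, Option.map_some, Option.getD_some,
    PySem.Chars.splitOnMax, h1, Int.toNat_one, he]
  simp
  rfl

-- the per-line effect of A, as folded by parse_prop_text_to_dict
def applyLine (d : PySem.Dict String String) (u : List Char) : PySem.Dict String String :=
  match aParseLine (String.ofList u) with
  | none => d
  | some kv => PySem.Dict.insert d kv.1 kv.2

-- A's per-line result, computed on the stripped character list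
def lineParse (core : List Char) : Option (String × String) :=
  if core = [] then none
  else if ['#'].isPrefixOf core then none
  else match aScan core 0 with
    | none => none
    | some i =>
      some (String.ofList (PySem.Chars.strip (core.take i)),
            String.ofList (PySem.Chars.strip ((core.drop (i + 1)).takeWhile noHash)))

def lineEffect (d : PySem.Dict String String) (core : List Char) : PySem.Dict String String :=
  match lineParse core with
  | none => d
  | some kv => PySem.Dict.insert d kv.1 kv.2

theorem strip_ofList (x : List Char) :
    PySem.Str.strip (String.ofList x) = String.ofList (PySem.Chars.strip x) := by
  simp [PySem.Str.strip]

theorem slice_key_toList (x : List Char) (i : Nat) :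
    (PySem.Str.slice (String.ofList x) none (some (i : Int))).toList = x.take i := by
  simp [PySem.Str.toList_slice, PySem.Chars.slice_eq_listSlice, PySem.List.slice_to_natCast]

theorem slice_val_toList (x : List Char) (i : Nat) :
    (PySem.Str.slice (String.ofList x) (some ((i : Int) + 1)) none).toList = x.drop (i + 1) := by
  rw [PySem.Str.toList_slice, PySem.Chars.slice_eq_listSlice, String.toList_ofList,
    show ((i : Int) + 1) = ((i + 1 : Nat) : Int) by push_cast; ring,
    PySem.List.slice_from_natCast]

theorem aParseLine_eval (u : List Char) :
    aParseLine (String.ofList u) = lineParse (PySem.Chars.strip u) := by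
  by_cases h1 : PySem.Chars.strip u = []
  · simp [aParseLine, strip_ofList, lineParse, h1]
  · have h1' : ¬(String.ofList (PySem.Chars.strip u) = "") :=
      fun hc => h1 (by simpa using congrArg String.toList hc)
    have hsw : PySem.Str.startswith (String.ofList (PySem.Chars.strip u)) "#"
        = ['#'].isPrefixOf (PySem.Chars.strip u) := by
      simp [PySem.Chars.startswith]
    by_cases h2 : ['#'].isPrefixOf (PySem.Chars.strip u) = true
    · simp [aParseLine, strip_ofList, lineParse, h1, h1', PySem.Chars.startswith, h2]
    · cases hscan : aScan (PySem.Chars.strip u) 0 with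
      | none =>
        simp [aParseLine, strip_ofList, lineParse, h1, h1', PySem.Chars.startswith, h2, hscan]
      | some i =>
        have hstr : ∀ x : String,
            PySem.Str.strip x = String.ofList (PySem.Chars.strip x.toList) := fun x => rfl
        have hkey : PySem.Str.strip
              (PySem.Str.slice (String.ofList (PySem.Chars.strip u)) none (some (i : Int)))
            = String.ofList (PySem.Chars.strip ((PySem.Chars.strip u).take i)) := by
          rw [hstr, slice_key_toList]
        have hval : PySem.Str.strip
              (((PySem.Str.splitMax? (PySem.Str.slice (String.ofList (PySem.Chars.strip u))
                  (some ((i : Int) + 1)) none) "#" 1).getD []).headD "")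
            = String.ofList (PySem.Chars.strip
                (((PySem.Chars.strip u).drop (i + 1)).takeWhile noHash)) := by
          rw [str_splitMax_head, strip_ofList, slice_val_toList]
        simp [aParseLine, strip_ofList, lineParse, h1, h1', PySem.Chars.startswith, h2, hscan,
          hkey]
        simpa using hval

theorem applyLine_eq_lineEffect (d : PySem.Dict String String) (u : List Char) :
    applyLine d u = lineEffect d (PySem.Chars.strip u) := by
  rw [applyLine, lineEffect, aParseLine_eval]

def ndb (a : Char) : Bool := !(a == ':' || a == '=')

theorem ndb_eq_true_iff (a : Char) : ndb a = true ↔ ¬(a = ':' ∨ a = '=') := by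
  simp [ndb]

theorem mem_rstrip (a : Char) (l : List Char) (h : a ∈ PySem.Chars.rstrip l) : a ∈ l := by
  simp only [PySem.Chars.rstrip, List.mem_reverse] at h
  simpa using (List.dropWhile_sublist _).subset h

theorem isspace_delim (dc : Char) (hd : dc = ':' ∨ dc = '=') :
    PySem.Chars.isspace dc = false := by
  rcases hd with rfl | rfl <;> decide

theorem not_hash_prefix (c : Char) (xs : List Char) (h : ¬(c = '#')) :
    (['#'].isPrefixOf (c :: xs)) = false := by
  have : ('#' == c) = false := beq_eq_false_iff_ne.mpr (fun q => h q.symm)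
  simp [List.isPrefixOf, this]

-- machine over one line (leading whitespace already removed) + '\n'
theorem machine_line_core (d : PySem.Dict String String) (v : List Char)
    (hnlv : '\n' ∉ v)
    (hhd : ∀ c v', v = c :: v' → PySem.Chars.isspace c = false) :
    (v ++ ['\n']).foldl bStep (0, [], [], d)
      = (0, [], [], lineEffect d (PySem.Chars.rstrip v)) := by
  cases v with
  | nil => simp [bStep, PySem.Chars.rstrip, lineEffect, lineParse]
  | cons c v' =>
    have hcns : PySem.Chars.isspace c = false := hhd c v' rfl
    have hcnl : ¬(c = '\n') := fun h => hnlv (by simp [h])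
    have hnlv' : '\n' ∉ v' := fun h => hnlv (by simp [h])
    have hrst : PySem.Chars.rstrip (c :: v') = c :: PySem.Chars.rstrip v' :=
      rstrip_cons_of_nonspace c v' hcns
    by_cases hcHash : c = '#'
    · subst hcHash
      rw [List.cons_append, List.foldl_cons,
        show bStep (0, [], [], d) '#' = (3, [], [], d) by simp [bStep]; decide,
        List.foldl_append, fold_state3 _ _ _ _ hnlv',
        show (['\n'].foldl bStep (3, ([] : List Char), ([] : List Char), d)) = (0, [], [], d) by
          simp [bStep]]
      have hlp : lineParse (PySem.Chars.rstrip ('#' :: v')) = none := by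
        rw [lineParse, hrst]
        simp [List.isPrefixOf]
      simp [lineEffect, hlp]
    · by_cases hcd : c = ':' ∨ c = '='
      · -- key is empty: delimiter is the first character
        obtain ⟨w2, hw2, hws2⟩ := rstrip_decomp v'
        rw [List.cons_append, List.foldl_cons,
          show bStep (0, [], [], d) c = (2, [], [], d) by simp [bStep, hcnl, hcns, hcHash, hcd],
          fold_state2 _ _ _ _ hnlv']
        have hscan : aScan (PySem.Chars.rstrip (c :: v')) 0 = some 0 := by
          rw [hrst]
          simpa using aScan_first [] c (PySem.Chars.rstrip v') (by intro a ha; simp at ha) hcd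
        have hval : PySem.Chars.strip ((PySem.Chars.rstrip v').takeWhile noHash)
            = PySem.Chars.strip (v'.takeWhile noHash) := by
          conv_rhs => rw [hw2]
          rw [strip_takeWhile_append_ws _ _ hws2]
        have hlp : lineParse (PySem.Chars.rstrip (c :: v'))
            = some (String.ofList (PySem.Chars.strip ([] : List Char)),
                String.ofList (PySem.Chars.strip (v'.takeWhile noHash))) := by
          rw [lineParse, if_neg (by rw [hrst]; simp),
            if_neg (by rw [hrst]; simp [not_hash_prefix c _ hcHash]), hscan]
          simp [hrst, hval]
        simp [lineEffect, hlp]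
      · -- first character starts the key
        rw [List.cons_append, List.foldl_cons,
          show bStep (0, [], [], d) c = (1, [], [c], d) by simp [bStep, hcnl, hcns, hcHash, hcd]]
        by_cases hall : ND v'
        · -- no delimiter anywhere: the line is discarded
          rw [List.foldl_append, fold_state1 _ _ _ _ hall hnlv',
            show (['\n'].foldl bStep (1, ([] : List Char), [c] ++ v', d)) = (0, [], [], d) by
              simp [bStep]]
          have hnd : ND (PySem.Chars.rstrip (c :: v')) := by
            intro a ha
            rw [hrst] at ha
            rcases List.mem_cons.mp ha with rfl | ha
            · exact hcd
            · exact hall a (mem_rstrip a v' ha)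
          have hlp : lineParse (PySem.Chars.rstrip (c :: v')) = none := by
            rw [lineParse, if_neg (by rw [hrst]; simp),
              if_neg (by rw [hrst]; simp [not_hash_prefix c _ hcHash]), aScan_none _ hnd]
          simp [lineEffect, hlp]
        · -- first delimiter inside v'
          have hne : v'.dropWhile ndb ≠ [] := by
            intro hc
            exact hall (fun a ha => (ndb_eq_true_iff a).mp (List.dropWhile_eq_nil_iff.mp hc a ha))
          obtain ⟨dc, q, hdw⟩ := List.exists_cons_of_ne_nil hne
          have hdcd : dc = ':' ∨ dc = '=' := by
            have h := head_dropWhile_false ndb v' dc q hdw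
            simp [ndb] at h
            exact (em (dc = ':')).elim Or.inl (fun hn => Or.inr (h hn))
          have hdec : v' = v'.takeWhile ndb ++ dc :: q := by
            conv_lhs => rw [← List.takeWhile_append_dropWhile (p := ndb) (l := v'), hdw]
          have hndp : ND (v'.takeWhile ndb) :=
            fun a ha => (ndb_eq_true_iff a).mp (List.mem_takeWhile_imp ha)
          have hnlq : '\n' ∉ q := by
            intro hq
            exact hnlv' (hdec ▸ List.mem_append_right _ (by simp [hq]))
          have hnlp : '\n' ∉ v'.takeWhile ndb :=
            fun hq => hnlv' ((List.takeWhile_sublist _).subset hq)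
          have hdcnl : ¬(dc = '\n') := by
            intro h
            exact hnlv' (hdec ▸ List.mem_append_right _ (by simp [h]))
          obtain ⟨wq, hwq, hwsq⟩ := rstrip_decomp q
          -- machine side
          conv_lhs => rw [hdec, List.append_assoc, List.cons_append, List.foldl_append]
          rw [fold_state1 _ _ _ _ hndp hnlp, List.foldl_cons,
            show bStep (1, [], [c] ++ v'.takeWhile ndb, d) dc
              = (2, [c] ++ v'.takeWhile ndb, [], d) by simp [bStep, hdcnl, hdcd],
            fold_state2 _ _ _ _ hnlq]
          -- A side
          have hcore : PySem.Chars.rstrip (c :: v')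
              = (c :: v'.takeWhile ndb) ++ dc :: PySem.Chars.rstrip q := by
            rw [show c :: v' = (c :: v'.takeWhile ndb) ++ dc :: q by
                rw [List.cons_append, ← hdec],
              rstrip_append_nonspace _ _ _ (isspace_delim dc hdcd)]
          have hscan : aScan (PySem.Chars.rstrip (c :: v')) 0
              = some ((v'.takeWhile ndb).length + 1) := by
            rw [hcore]
            have := aScan_first (c :: v'.takeWhile ndb) dc (PySem.Chars.rstrip q) (by
              intro a ha
              rcases List.mem_cons.mp ha with rfl | ha
              · exact hcd
              · exact hndp a ha) hdcd
            simpa using this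
          have htake : (PySem.Chars.rstrip (c :: v')).take ((v'.takeWhile ndb).length + 1)
              = c :: v'.takeWhile ndb := by
            rw [hcore]
            simp
          have hdrop : (PySem.Chars.rstrip (c :: v')).drop ((v'.takeWhile ndb).length + 1 + 1)
              = PySem.Chars.rstrip q := by
            rw [hcore,
              show (c :: v'.takeWhile ndb) ++ dc :: PySem.Chars.rstrip q
                = ((c :: v'.takeWhile ndb) ++ [dc]) ++ PySem.Chars.rstrip q by simp]
            simp
          have hval : PySem.Chars.strip ((PySem.Chars.rstrip q).takeWhile noHash)
              = PySem.Chars.strip (q.takeWhile noHash) := by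
            conv_rhs => rw [hwq]
            rw [strip_takeWhile_append_ws _ _ hwsq]
          have hlp : lineParse (PySem.Chars.rstrip (c :: v'))
              = some (String.ofList (PySem.Chars.strip (c :: v'.takeWhile ndb)),
                  String.ofList (PySem.Chars.strip (q.takeWhile noHash))) := by
            rw [lineParse, if_neg (by rw [hrst]; simp),
              if_neg (by rw [hrst]; simp [not_hash_prefix c _ hcHash]), hscan]
            simp [htake, hdrop, hval]
          simp [lineEffect, hlp]

-- the central lemma: the machine over one raw line + '\n' performs A's per-line effect
theorem machine_line (d : PySem.Dict String String) (u : List Char) (hnl : '\n' ∉ u) :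
    (u ++ ['\n']).foldl bStep (0, [], [], d) = (0, [], [], applyLine d u) := by
  have hWSw : WS (u.takeWhile PySem.Chars.isspace) := fun a ha => List.mem_takeWhile_imp ha
  have hnlw : '\n' ∉ u.takeWhile PySem.Chars.isspace :=
    fun h => hnl ((List.takeWhile_sublist _).subset h)
  have hnlv : '\n' ∉ u.dropWhile PySem.Chars.isspace :=
    fun h => hnl ((List.dropWhile_sublist _).subset h)
  have hfold1 : (u ++ ['\n']).foldl bStep (0, [], [], d)
      = ((u.dropWhile PySem.Chars.isspace) ++ ['\n']).foldl bStep (0, [], [], d) := by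
    conv_lhs => rw [← List.takeWhile_append_dropWhile (p := PySem.Chars.isspace) (l := u),
      List.append_assoc]
    rw [List.foldl_append, fold_state0_ws _ _ _ _ hWSw hnlw]
  rw [hfold1,
    machine_line_core d _ hnlv (fun c v' hv => head_dropWhile_false _ _ _ _ hv),
    applyLine_eq_lineEffect]
  rfl

theorem machine_lines (d : PySem.Dict String String) (chunks : List (List Char))
    (h : ∀ u ∈ chunks, '\n' ∉ u) :
    ((chunks.map (fun u => u ++ ['\n'])).flatten).foldl bStep (0, [], [], d)
      = (0, [], [], chunks.foldl applyLine d) := by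
  induction chunks generalizing d with
  | nil => rfl
  | cons u cs ih =>
    rw [List.map_cons, List.flatten_cons, List.foldl_append,
      machine_line d u (h u (by simp)), ih _ (fun x hx => h x (by simp [hx])),
      List.foldl_cons]

theorem fold_insert_filterMap (chunks : List (List Char)) :
    ∀ d : PySem.Dict String String,
    chunks.foldl applyLine d
      = ((chunks.map String.ofList).filterMap aParseLine).foldl
          (fun d kv => PySem.Dict.insert d kv.1 kv.2) d := by
  induction chunks with
  | nil => intro d; rfl
  | cons u cs ih =>
    intro d
    rw [List.foldl_cons, List.map_cons, List.filterMap_cons]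
    cases hp : aParseLine (String.ofList u) with
    | none => rw [show applyLine d u = d by rw [applyLine, hp], ih]
    | some kv =>
      rw [show applyLine d u = PySem.Dict.insert d kv.1 kv.2 by rw [applyLine, hp],
        List.foldl_cons, ih]

-- ===== VERDICT (by name: the statement is the Claim_ definition above) =====
theorem parse_prop_text_to_dict_spec : Claim_equal_parse_prop_text_to_dict := by
  intro text _
  unfold Spec_parse_prop_text_to_dict
  match text with
  | none => rfl
  | some s =>
    by_cases hs : s = ""
    · subst hs; rfl
    · have hsplit : (PySem.Str.split? s "\n").getD []
          = (mySplit '\n' s.toList).map String.ofList := by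
        rw [PySem.Str.split?,
          show ("\n" : String).toList = ['\n'] from rfl, PySem.Chars.split?]
        simp [splitOn_eq_mySplit]
      rw [show parse_prop_text_to_dict (some s)
          = ((((PySem.Str.split? s "\n").getD []).filterMap aParseLine).foldl
              (fun d kv => PySem.Dict.insert d kv.1 kv.2) PySem.Dict.empty).items from by
            rw [parse_prop_text_to_dict, parse_prop_text_to_pairs, if_neg hs],
        hsplit, ← fold_insert_filterMap,
        show parse_prop_text_to_dict_alt (some s)
          = (((s.toList ++ ['\n']).foldl bStep (0, [], [], PySem.Dict.empty)).2.2.2).items from rfl,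
        mySplit_flatten '\n' s.toList,
        machine_lines _ _ (mySplit_no_sep '\n' s.toList)]
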